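-- pv_equiv track=rewrite | github.com/juangrukat/mcp-devonthink | app/tools/devonthink_link_tools.py | _lowest_signal_tier_for_edges
-- ===== SOURCE A (Python) =====
-- from typing import Any
--
-- SIGNAL_TIER_LEVEL = {
--     "authoritative": 1,
--     "structural": 2,
--     "inferred": 3,
-- }
--
-- REASON_SIGNAL_TIER = {
--     "outgoing_reference": "authoritative",
--     "incoming_reference": "authoritative",
--     "outgoing_wiki_reference": "authoritative",
--     "incoming_wiki_reference": "authoritative",
--     "explicit_item_link": "structural",
--     "wikilink": "structural",
--     "shared_tag": "structural",
--     "alias_match": "structural",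
--     "same_group_context": "structural",
--     "hub_cooccurrence": "structural",
--     "explicit_mention": "inferred",
--     "title_fuzzy_match": "inferred",
--     "concordance_overlap": "inferred",
-- }
--
-- def _signal_tier_for_reason(reason_code: str) -> str:
--     return REASON_SIGNAL_TIER.get(reason_code, "inferred")
--
-- def _lowest_signal_tier_for_edges(edges: list[dict[str, Any]]) -> str:
--     if not edges:
--         return "authoritative"
--     tier = "authoritative"
--     for edge in edges:
--         edge_tier = _signal_tier_for_reason(str(edge.get("reason_code", "")))
--         if SIGNAL_TIER_LEVEL[edge_tier] > SIGNAL_TIER_LEVEL[tier]: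
--             tier = edge_tier
--     return tier
-- ===== SOURCE B (Python) =====
-- from typing import Any
--
-- SIGNAL_TIER_LEVEL = {
--     "authoritative": 1,
--     "structural": 2,
--     "inferred": 3,
-- }
--
-- REASON_SIGNAL_TIER = {
--     "outgoing_reference": "authoritative",
--     "incoming_reference": "authoritative",
--     "outgoing_wiki_reference": "authoritative",
--     "incoming_wiki_reference": "authoritative",
--     "explicit_item_link": "structural",
--     "wikilink": "structural",
--     "shared_tag": "structural",
--     "alias_match": "structural",
--     "same_group_context": "structural",
--     "hub_cooccurrence": "structural",
--     "explicit_mention": "inferred",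
--     "title_fuzzy_match": "inferred",
--     "concordance_overlap": "inferred",
-- }
--
-- def _signal_tier_for_reason(reason_code: str) -> str:
--     return REASON_SIGNAL_TIER.get(reason_code, "inferred")
--
-- def _lowest_signal_tier_for_edges(edges: list[dict[str, Any]]) -> str:
--     tiers = {_signal_tier_for_reason(str(edge.get("reason_code", ""))) for edge in edges}
--     if "inferred" in tiers:
--         return "inferred"
--     if "structural" in tiers:
--         return "structural"
--     return "authoritative"
-- ===== Notes on version B (the rewrite author's own statement) =====
-- stated objective: idiomatic
-- what changed: Replaces the running level-maximum with a comparison-free pass that collects the set of tiers seen, then resolves by ordered membership (inferred, structural, authoritative), which also removes the empty-list special case.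
import Mathlib
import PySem

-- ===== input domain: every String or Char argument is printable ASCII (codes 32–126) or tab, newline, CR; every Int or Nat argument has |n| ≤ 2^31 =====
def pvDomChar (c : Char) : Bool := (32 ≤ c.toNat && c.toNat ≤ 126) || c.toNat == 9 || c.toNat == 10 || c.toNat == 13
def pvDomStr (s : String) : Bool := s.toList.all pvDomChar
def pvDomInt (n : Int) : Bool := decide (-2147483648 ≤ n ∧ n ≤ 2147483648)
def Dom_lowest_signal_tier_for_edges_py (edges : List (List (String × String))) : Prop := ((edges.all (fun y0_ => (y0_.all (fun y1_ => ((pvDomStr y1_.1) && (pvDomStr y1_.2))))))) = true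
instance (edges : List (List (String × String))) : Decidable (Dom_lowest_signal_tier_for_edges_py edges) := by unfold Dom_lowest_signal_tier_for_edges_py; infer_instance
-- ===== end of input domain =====

-- ===== PORT A =====
-- B collects the set of tiers in one pass and resolves by ordered membership instead of A's running maximum (idiomatic decomposition; return value only).
def pvReasonSignalTier : PySem.Dict String String :=
  PySem.Dict.mk
    [("outgoing_reference", "authoritative"), ("incoming_reference", "authoritative"),
     ("outgoing_wiki_reference", "authoritative"), ("incoming_wiki_reference", "authoritative"),
     ("explicit_item_link", "structural"), ("wikilink", "structural"),
     ("shared_tag", "structural"), ("alias_match", "structural"),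
     ("same_group_context", "structural"), ("hub_cooccurrence", "structural"),
     ("explicit_mention", "inferred"), ("title_fuzzy_match", "inferred"),
     ("concordance_overlap", "inferred")]

def pvSignalTierLevel : PySem.Dict String Int :=
  PySem.Dict.mk [("authoritative", 1), ("structural", 2), ("inferred", 3)]

def signal_tier_for_reason_py (reason_code : String) : String :=
  PySem.Dict.getD pvReasonSignalTier reason_code "inferred"

-- SIGNAL_TIER_LEVEL[t] cannot raise: t is always a value of REASON_SIGNAL_TIER or "inferred"; getD _ 0 is exact here
def lowest_signal_tier_for_edges_py (edges : List (List (String × String))) : String :=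
  if edges = [] then "authoritative"
  else
    edges.foldl (fun tier edge =>
      let edge_tier := signal_tier_for_reason_py (PySem.Dict.getD (PySem.Dict.mk edge) "reason_code" "")
      if PySem.Dict.getD pvSignalTierLevel edge_tier 0 > PySem.Dict.getD pvSignalTierLevel tier 0
      then edge_tier else tier) "authoritative"

-- ===== PORT B =====
def lowest_signal_tier_for_edges_py_alt (edges : List (List (String × String))) : String :=
  let tiers : PySem.Set String :=
    PySem.Set.ofList (edges.map (fun edge =>
      signal_tier_for_reason_py (PySem.Dict.getD (PySem.Dict.mk edge) "reason_code" "")))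
  if tiers.contains "inferred" then "inferred"
  else if tiers.contains "structural" then "structural"
  else "authoritative"

-- ===== PRECONDITION & SPEC =====
def Spec_lowest_signal_tier_for_edges_py (edges : List (List (String × String))) (out : String) : Prop := out = lowest_signal_tier_for_edges_py_alt edges
instance (edges : List (List (String × String))) (out : String) : Decidable (Spec_lowest_signal_tier_for_edges_py edges out) := by unfold Spec_lowest_signal_tier_for_edges_py; infer_instance

-- ===== CLAIM (what is proved, stated in full; the proofs are below) =====
def Claim_equal_lowest_signal_tier_for_edges_py : Prop := ∀ (edges : List (List (String × String))), Dom_lowest_signal_tier_for_edges_py edges → Spec_lowest_signal_tier_for_edges_py edges (lowest_signal_tier_for_edges_py edges)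

-- ===== LEMMAS AND PROOFS =====

theorem level_auth : PySem.Dict.getD pvSignalTierLevel "authoritative" 0 = 1 := by decide
theorem level_struct : PySem.Dict.getD pvSignalTierLevel "structural" 0 = 2 := by decide
theorem level_inf : PySem.Dict.getD pvSignalTierLevel "inferred" 0 = 3 := by decide

-- every tier produced by signal_tier_for_reason_py is one of the three tier names
theorem tier_mem (r : String) :
    signal_tier_for_reason_py r = "authoritative" ∨ signal_tier_for_reason_py r = "structural" ∨
      signal_tier_for_reason_py r = "inferred" := by
  unfold signal_tier_for_reason_py
  rw [PySem.Dict.getD_eq_get?_getD]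
  rcases h : PySem.Dict.get? pvReasonSignalTier r with _ | v
  · simp
  · have hv := PySem.Dict.mem_items_of_get?_eq_some _ h
    simp only [pvReasonSignalTier, List.mem_cons, List.not_mem_nil,
      Prod.mk.injEq, or_false] at hv
    simp only [Option.getD_some]
    rcases hv with ⟨_, rfl⟩ | ⟨_, rfl⟩ | ⟨_, rfl⟩ | ⟨_, rfl⟩ | ⟨_, rfl⟩ | ⟨_, rfl⟩ |
      ⟨_, rfl⟩ | ⟨_, rfl⟩ | ⟨_, rfl⟩ | ⟨_, rfl⟩ | ⟨_, rfl⟩ | ⟨_, rfl⟩ | ⟨_, rfl⟩ <;> tauto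

-- A's fold over a list of tiers, characterised by membership, for any accumulator among the three tiers
theorem foldA_char (ts : List String)
    (hts : ∀ t ∈ ts, t = "authoritative" ∨ t = "structural" ∨ t = "inferred")
    (acc : String) (hacc : acc = "authoritative" ∨ acc = "structural" ∨ acc = "inferred") :
    ts.foldl (fun tier et =>
        if PySem.Dict.getD pvSignalTierLevel et 0 > PySem.Dict.getD pvSignalTierLevel tier 0
        then et else tier) acc
      = if acc = "inferred" ∨ "inferred" ∈ ts then "inferred"
        else if acc = "structural" ∨ "structural" ∈ ts then "structural"
        else "authoritative" := by
  induction ts generalizing acc with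
  | nil =>
      simp only [List.foldl, List.not_mem_nil, or_false]
      rcases hacc with h | h | h <;> simp [h]
  | cons x l ih =>
      have hx := hts x (List.mem_cons_self ..)
      have hl : ∀ t ∈ l, t = "authoritative" ∨ t = "structural" ∨ t = "inferred" :=
        fun t ht => hts t (List.mem_cons_of_mem _ ht)
      simp only [List.foldl_cons]
      rcases hx with hx | hx | hx <;> rcases hacc with ha | ha | ha <;>
        subst hx <;> subst ha <;>
        simp only [level_auth, level_struct, level_inf] <;>
        norm_num <;>
        rw [ih hl _ (by tauto)] <;>
        simp

theorem contains_ofList_eq (xs : List String) (x : String) :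
    (PySem.Set.ofList xs).contains x = decide (x ∈ xs) := by
  have h := PySem.Set.contains_iff (PySem.Set.ofList xs) x
  rw [PySem.Set.mem_ofList] at h
  by_cases hm : x ∈ xs
  · rw [h.mpr hm]; simp [hm]
  · rcases Bool.eq_false_or_eq_true ((PySem.Set.ofList xs).contains x) with hb | hb
    · exact absurd (h.mp hb) hm
    · rw [hb]; simp [hm]

-- ===== VERDICT (by name: the statement is the Claim_ definition above) =====
theorem lowest_signal_tier_for_edges_py_spec : Claim_equal_lowest_signal_tier_for_edges_py := by
  intro edges _
  unfold Spec_lowest_signal_tier_for_edges_py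
  unfold lowest_signal_tier_for_edges_py lowest_signal_tier_for_edges_py_alt
  by_cases he : edges = []
  · subst he; simp [PySem.Set.ofList, PySem.Set.contains]
  · simp only [if_neg he]
    have hchar := foldA_char
      (edges.map (fun edge => signal_tier_for_reason_py (PySem.Dict.getD (PySem.Dict.mk edge) "reason_code" "")))
      (by intro t ht; simp only [List.mem_map] at ht; obtain ⟨e, _, rfl⟩ := ht; exact tier_mem _)
      "authoritative" (Or.inl rfl)
    rw [List.foldl_map] at hchar
    rw [hchar]
    simp only [contains_ofList_eq]
    by_cases h1 : "inferred" ∈ edges.map (fun edge => signal_tier_for_reason_py (PySem.Dict.getD (PySem.Dict.mk edge) "reason_code" "")) <;>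
      by_cases h2 : "structural" ∈ edges.map (fun edge => signal_tier_for_reason_py (PySem.Dict.getD (PySem.Dict.mk edge) "reason_code" "")) <;>
      simp [h1, h2]
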